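-- pv_equiv track=rewrite | github.com/yufr007/ai-orchestration | src/agents/reviewer.py | identify_tech_stack
-- ===== SOURCE A (Python) =====
-- def identify_tech_stack(files: list[str]) -> str:
--     """Identify primary technology stack from file extensions."""
--     extensions = {file.split(".")[-1] for file in files if "." in file}
--
--     if "py" in extensions:
--         return "Python"
--     elif "ts" in extensions or "tsx" in extensions:
--         return "TypeScript/React"
--     elif "js" in extensions or "jsx" in extensions:
--         return "JavaScript/React"
--     elif "go" in extensions:
--         return "Go"
--     elif "rs" in extensions:
--         return "Rust"
--     else:
--         return "General"
-- ===== SOURCE B (Python) =====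
-- def identify_tech_stack(files: list[str]) -> str:
--     """Identify primary technology stack from file extensions.
--
--     Single pass keeping the best (lowest) priority rank seen; no set is built.
--     """
--     RANKS = {"py": 0, "ts": 1, "tsx": 1, "js": 2, "jsx": 2, "go": 3, "rs": 4}
--     NAMES = ["Python", "TypeScript/React", "JavaScript/React", "Go", "Rust"]
--     best = 5
--     for f in files:
--         if "." in f:
--             r = RANKS.get(f.split(".")[-1], 5)
--             if r < best:
--                 best = r
--     return NAMES[best] if best < 5 else "General"
-- ===== Notes on version B (the rewrite author's own statement) =====
-- stated objective: alternative
-- what changed: Replaces the materialized extension set plus an ordered chain of membership tests by a single fold over the files that keeps the minimum priority rank (via a rank dict) and translates it to a name at the end.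
import Mathlib
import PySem

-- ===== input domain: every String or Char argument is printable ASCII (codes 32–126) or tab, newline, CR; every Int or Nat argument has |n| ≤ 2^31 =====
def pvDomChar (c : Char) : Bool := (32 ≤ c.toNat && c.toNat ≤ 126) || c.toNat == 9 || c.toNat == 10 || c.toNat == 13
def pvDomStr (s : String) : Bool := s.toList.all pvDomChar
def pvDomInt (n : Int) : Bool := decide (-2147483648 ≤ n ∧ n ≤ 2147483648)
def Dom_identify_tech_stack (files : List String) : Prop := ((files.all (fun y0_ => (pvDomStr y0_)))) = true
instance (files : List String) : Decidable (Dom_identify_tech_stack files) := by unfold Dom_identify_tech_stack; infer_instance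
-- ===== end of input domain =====

-- B replaces A's materialized extension set + ordered membership-test chain by a single
-- fold keeping the minimum priority rank (objective: alternative, same cost).

-- ===== PORT A =====
-- file.split("."): split? with a nonempty separator always returns some, and the result is a
-- nonempty list, so the .getD [] and the [-1] default "" are never used; exact here.
def identify_tech_stack (files : List String) : String :=
  let extensions : PySem.Set String :=
    PySem.Set.ofList ((files.filter (fun f => PySem.Str.isIn "." f)).map
      (fun f => PySem.List.pyGetD ((PySem.Str.split? f ".").getD []) (-1) ""))
  if PySem.Set.contains extensions "py" then "Python"
  else if PySem.Set.contains extensions "ts" || PySem.Set.contains extensions "tsx" then "TypeScript/React"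
  else if PySem.Set.contains extensions "js" || PySem.Set.contains extensions "jsx" then "JavaScript/React"
  else if PySem.Set.contains extensions "go" then "Go"
  else if PySem.Set.contains extensions "rs" then "Rust"
  else "General"

-- ===== PORT B =====
def pvRanks : PySem.Dict String Int :=
  PySem.Dict.ofList [("py", 0), ("ts", 1), ("tsx", 1), ("js", 2), ("jsx", 2), ("go", 3), ("rs", 4)]

def pvNames : List String := ["Python", "TypeScript/React", "JavaScript/React", "Go", "Rust"]

def identify_tech_stack_alt (files : List String) : String :=
  let best : Int := files.foldl (fun best f =>
    if PySem.Str.isIn "." f then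
      let r := PySem.Dict.getD pvRanks (PySem.List.pyGetD ((PySem.Str.split? f ".").getD []) (-1) "") 5
      if r < best then r else best
    else best) 5
  if best < 5 then PySem.List.pyGetD pvNames best "General" else "General"

-- ===== PRECONDITION & SPEC =====
def Spec_identify_tech_stack (files : List String) (out : String) : Prop := out = identify_tech_stack_alt files
instance (files : List String) (out : String) : Decidable (Spec_identify_tech_stack files out) := by unfold Spec_identify_tech_stack; infer_instance

-- ===== CLAIM (what is proved, stated in full; the proofs are below) =====
def Claim_equal_identify_tech_stack : Prop := ∀ (files : List String), Dom_identify_tech_stack files → Spec_identify_tech_stack files (identify_tech_stack files)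

-- ===== LEMMAS AND PROOFS =====

-- the extension of a file (the subexpression both ports compute)
def pvExt (f : String) : String :=
  PySem.List.pyGetD ((PySem.Str.split? f ".").getD []) (-1) ""

def pvExts (files : List String) : List String :=
  (files.filter (fun f => PySem.Str.isIn "." f)).map pvExt

-- the pvRanks dict lookup, as a chain of equality tests
def pvRank (e : String) : Int :=
  if e = "py" then 0 else if e = "ts" then 1 else if e = "tsx" then 1
  else if e = "js" then 2 else if e = "jsx" then 2
  else if e = "go" then 3 else if e = "rs" then 4 else 5

lemma pvRanks_getD (e : String) : PySem.Dict.getD pvRanks e 5 = pvRank e := by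
  by_cases h1 : e = "py"; · subst h1; decide
  by_cases h2 : e = "ts"; · subst h2; decide
  by_cases h3 : e = "tsx"; · subst h3; decide
  by_cases h4 : e = "js"; · subst h4; decide
  by_cases h5 : e = "jsx"; · subst h5; decide
  by_cases h6 : e = "go"; · subst h6; decide
  by_cases h7 : e = "rs"; · subst h7; decide
  have hit : pvRanks.items
      = [("py", 0), ("ts", 1), ("tsx", 1), ("js", 2), ("jsx", 2), ("go", 3), ("rs", 4)] := by decide
  simp [pvRank, PySem.Dict.getD, PySem.Dict.get?, hit, List.find?, h1, h2, h3, h4, h5, h6, h7,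
    beq_eq_false_iff_ne.mpr (Ne.symm h1), beq_eq_false_iff_ne.mpr (Ne.symm h2),
    beq_eq_false_iff_ne.mpr (Ne.symm h3), beq_eq_false_iff_ne.mpr (Ne.symm h4),
    beq_eq_false_iff_ne.mpr (Ne.symm h5), beq_eq_false_iff_ne.mpr (Ne.symm h6),
    beq_eq_false_iff_ne.mpr (Ne.symm h7)]

lemma pvRank_nonneg (e : String) : 0 ≤ pvRank e := by unfold pvRank; split_ifs <;> omega
lemma pvRank_le (e : String) : pvRank e ≤ 5 := by unfold pvRank; split_ifs <;> omega

-- the minimal rank present in a list of extensions, phrased as A's membership chain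
def pvChainRank (E : List String) : Int :=
  if "py" ∈ E then 0 else if "ts" ∈ E ∨ "tsx" ∈ E then 1
  else if "js" ∈ E ∨ "jsx" ∈ E then 2 else if "go" ∈ E then 3
  else if "rs" ∈ E then 4 else 5

lemma pvChainRank_nonneg (E : List String) : 0 ≤ pvChainRank E := by
  unfold pvChainRank; split_ifs <;> omega
lemma pvChainRank_le (E : List String) : pvChainRank E ≤ 5 := by
  unfold pvChainRank; split_ifs <;> omega

lemma pvChainRank_cons (e : String) (E : List String) :
    pvChainRank (e :: E) = min (pvRank e) (pvChainRank E) := by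
  have hle := pvChainRank_le E
  have hnn := pvChainRank_nonneg E
  unfold pvChainRank pvRank
  by_cases h1 : e = "py"; · subst h1; simp [List.mem_cons]; split_ifs <;> omega
  by_cases h2 : e = "ts"; · subst h2; simp [List.mem_cons]; split_ifs <;> omega
  by_cases h3 : e = "tsx"; · subst h3; simp [List.mem_cons]; split_ifs <;> omega
  by_cases h4 : e = "js"; · subst h4; simp [List.mem_cons]; split_ifs <;> omega
  by_cases h5 : e = "jsx"; · subst h5; simp [List.mem_cons]; split_ifs <;> omega
  by_cases h6 : e = "go"; · subst h6; simp [List.mem_cons]; split_ifs <;> omega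
  by_cases h7 : e = "rs"; · subst h7; simp [List.mem_cons]; split_ifs <;> omega
  simp only [List.mem_cons, h1, h2, h3, h4, h5, h6, h7, if_false,
    eq_false (Ne.symm h1), eq_false (Ne.symm h2), eq_false (Ne.symm h3), eq_false (Ne.symm h4),
    eq_false (Ne.symm h5), eq_false (Ne.symm h6), eq_false (Ne.symm h7), false_or]
  split_ifs <;> omega

-- B's fold over the files computes the minimal rank of the extension list
lemma pvFold_eq_chainRank (files : List String) (b : Int) (hb : b ≤ 5) :
    files.foldl (fun best f =>
      if PySem.Str.isIn "." f then
        let r := PySem.Dict.getD pvRanks (PySem.List.pyGetD ((PySem.Str.split? f ".").getD []) (-1) "") 5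
        if r < best then r else best
      else best) b = min b (pvChainRank (pvExts files)) := by
  induction files generalizing b with
  | nil => simp [pvExts, pvChainRank]; omega
  | cons f fs ih =>
    simp only [List.foldl_cons]
    by_cases h : PySem.Str.isIn "." f = true
    · have h' : PySem.Chars.isIn ['.'] f.toList = true := h
      have hx : pvExts (f :: fs) = pvExt f :: pvExts fs := by
        simp [pvExts, h']
      have he := pvRanks_getD (pvExt f)
      have hr1 := pvRank_le (pvExt f)
      have hr2 := pvRank_nonneg (pvExt f)
      simp only [pvExt] at he hr1 hr2
      simp only [h, if_true]
      rw [ih _ (by rw [he]; split_ifs <;> omega), hx, pvChainRank_cons]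
      have h2 := pvChainRank_le (pvExts fs)
      rw [he]
      simp only [pvExt]
      split_ifs <;> omega
    · simp only [Bool.not_eq_true] at h
      have h' : PySem.Chars.isIn ['.'] f.toList = false := h
      have hx : pvExts (f :: fs) = pvExts fs := by simp [pvExts, h']
      simp only [h, Bool.false_eq_true, if_false, hx]
      exact ih b hb

-- ===== VERDICT (by name: the statement is the Claim_ definition above) =====
theorem identify_tech_stack_spec : Claim_equal_identify_tech_stack := by
  intro files _
  unfold Spec_identify_tech_stack identify_tech_stack identify_tech_stack_alt
  rw [pvFold_eq_chainRank files 5 (by omega)]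
  have h5 := pvChainRank_le (pvExts files)
  have hmin : min (5 : Int) (pvChainRank (pvExts files)) = pvChainRank (pvExts files) := by omega
  rw [hmin]
  have hset : ∀ x, PySem.Set.contains
      (PySem.Set.ofList ((files.filter (fun f => PySem.Str.isIn "." f)).map
        (fun f => PySem.List.pyGetD ((PySem.Str.split? f ".").getD []) (-1) ""))) x
      = decide (x ∈ pvExts files) := by
    intro x
    show PySem.Set.contains (PySem.Set.ofList (pvExts files)) x = decide (x ∈ pvExts files)
    by_cases hm : x ∈ pvExts files
    · have hc := (PySem.Set.contains_iff (PySem.Set.ofList (pvExts files)) x).mpr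
        ((PySem.Set.mem_ofList _ _).mpr hm)
      simp [hm]
    · have hn : x ∉ PySem.Set.ofList (pvExts files) := fun w => hm ((PySem.Set.mem_ofList _ _).mp w)
      have hc : PySem.Set.contains (PySem.Set.ofList (pvExts files)) x = false := by
        cases hcc : PySem.Set.contains (PySem.Set.ofList (pvExts files)) x
        · rfl
        · exact absurd ((PySem.Set.contains_iff _ _).mp hcc) hn
      simp [hm]
  simp only [hset, Bool.or_eq_true, decide_eq_true_eq]
  unfold pvChainRank
  by_cases h1 : "py" ∈ pvExts files
  · simp only [h1, if_true]; decide
  · by_cases h2 : "ts" ∈ pvExts files ∨ "tsx" ∈ pvExts files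
    · rcases h2 with h2 | h2 <;> simp only [h1, h2, if_true, if_false, true_or, or_true] <;> decide
    · rcases not_or.mp h2 with ⟨h2a, h2b⟩
      by_cases h3 : "js" ∈ pvExts files ∨ "jsx" ∈ pvExts files
      · rcases h3 with h3 | h3 <;> simp only [h1, h2a, h2b, h3, if_true, if_false, true_or,
          or_true, or_self] <;> decide
      · rcases not_or.mp h3 with ⟨h3a, h3b⟩
        by_cases h4 : "go" ∈ pvExts files
        · simp only [h1, h2a, h2b, h3a, h3b, h4, if_true, or_self]; decide
        · by_cases h5' : "rs" ∈ pvExts files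
          · simp only [h1, h2a, h2b, h3a, h3b, h4, h5', if_true, or_self]; decide
          · simp only [h1, h2a, h2b, h3a, h3b, h4, h5', or_self]; decide
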